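-- pv_equiv track=rewrite | github.com/dwalton76/rubiks-cube-lookup-tables | utils/print-moves.py | LFRB_preserved
-- ===== SOURCE A (Python) =====
-- def LFRB_preserved(steps):
--     """
--     When we are setting up to slice forward all of the centers are intact so we do
--     not have to worry about damaging them.  For slicing back though the LFRB centers
--     will look like:
--
--         x x x x  x x x x  x x x x  x x x x
--         x L L x  x D D x  x R R x  x U U x
--         x U U x  x L L x  x D D x  x R R x
--         x x x x  x x x x  x x x x  x x x x
--
--     Return True if steps leaves the centers intact
--     """
--     state_L = 0
--     state_F = 0
--     state_R = 0
--     state_B = 0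
--
--     for step in steps:
--
--         if step == "L":
--             state_L += 1
--         elif step == "L'":
--             state_L -= 1
--         elif step == "L2":
--             state_L += 2
--
--         elif step == "F":
--             state_F += 1
--         elif step == "F'":
--             state_F -= 1
--         elif step == "F2":
--             state_F += 2
--
--         elif step == "R":
--             state_R += 1
--         elif step == "R'":
--             state_R -= 1
--         elif step == "R2":
--             state_R += 2
--
--         elif step == "B":
--             state_B += 1
--         elif step == "B'":
--             state_B -= 1
--         elif step == "B2":
--             state_B += 2
--
--         elif step in ("D", "D'", "D2", "U", "U'", "U2"):
--             pass
--
--         else: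
--             raise Exception("Invalid step %s" % step)
--
--     #steps_str = ' '.join(steps)
--     #log.info("steps %s, state_L %d, state_F %d, state_R %d, state_B %d" % (steps_str, state_L, state_F, state_R, state_B))
--
--     if (state_L == 0 and state_F == 0 and state_R == 0 and state_B == 0):
--         return True
--
--     if (state_L % 4 == 0 and state_F % 4 == 0 and state_R % 4 == 0 and state_B % 4 == 0):
--         return True
--
--     return False
-- ===== SOURCE B (Python) =====
-- def LFRB_preserved(steps):
--     # Simulate the four LFRB face centers as concrete 4-sticker cycles:
--     # each turn rotates that face's sticker list; centers are intact iff
--     # every sticker list is back to the identity arrangement.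
--     rot = {"": 1, "'": 3, "2": 2}
--     ident = [0, 1, 2, 3]
--     centers = {f: ident for f in "LFRB"}
--     for step in steps:
--         face, sfx = step[:1], step[1:]
--         if face not in ("L", "F", "R", "B", "D", "U") or sfx not in rot:
--             raise Exception("Invalid step %s" % step)
--         if face in centers:
--             k = rot[sfx]
--             c = centers[face]
--             centers[face] = c[-k:] + c[:-k]
--     return all(c == ident for c in centers.values())
-- ===== Notes on version B (the rewrite author's own statement) =====
-- stated objective: alternative
-- what changed: Instead of accumulating a signed quarter-turn integer per face and testing divisibility by 4, B simulates each LFRB center as a concrete 4-sticker cycle (a dict of lists rotated by slicing per move, after splitting each token into face+suffix) and reports whether every cycle is back to the identity.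
import Mathlib
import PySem

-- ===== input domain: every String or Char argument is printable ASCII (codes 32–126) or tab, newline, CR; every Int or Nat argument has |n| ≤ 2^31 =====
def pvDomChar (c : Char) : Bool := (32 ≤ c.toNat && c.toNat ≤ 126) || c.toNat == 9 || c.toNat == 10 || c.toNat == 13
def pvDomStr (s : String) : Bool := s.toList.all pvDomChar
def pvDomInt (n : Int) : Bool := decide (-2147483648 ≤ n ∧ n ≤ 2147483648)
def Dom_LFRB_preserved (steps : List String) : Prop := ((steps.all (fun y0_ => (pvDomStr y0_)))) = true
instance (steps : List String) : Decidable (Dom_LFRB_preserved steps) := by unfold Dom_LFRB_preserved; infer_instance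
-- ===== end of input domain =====

-- B simulates the four LFRB center faces as concrete 4-sticker cycles rotated by list slicing
-- and compares them to the identity arrangement, instead of A's per-face integer accumulation
-- with a mod-4 check; on invalid tokens both Pythons raise identically (outside Pre_).

-- ===== PORT A =====
-- one loop iteration of A: none = the raise branch
def pvAStep (s : Int × Int × Int × Int) (step : String) : Option (Int × Int × Int × Int) :=
  if step = "L" then some (s.1 + 1, s.2.1, s.2.2.1, s.2.2.2)
  else if step = "L'" then some (s.1 - 1, s.2.1, s.2.2.1, s.2.2.2)
  else if step = "L2" then some (s.1 + 2, s.2.1, s.2.2.1, s.2.2.2)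
  else if step = "F" then some (s.1, s.2.1 + 1, s.2.2.1, s.2.2.2)
  else if step = "F'" then some (s.1, s.2.1 - 1, s.2.2.1, s.2.2.2)
  else if step = "F2" then some (s.1, s.2.1 + 2, s.2.2.1, s.2.2.2)
  else if step = "R" then some (s.1, s.2.1, s.2.2.1 + 1, s.2.2.2)
  else if step = "R'" then some (s.1, s.2.1, s.2.2.1 - 1, s.2.2.2)
  else if step = "R2" then some (s.1, s.2.1, s.2.2.1 + 2, s.2.2.2)
  else if step = "B" then some (s.1, s.2.1, s.2.2.1, s.2.2.2 + 1)
  else if step = "B'" then some (s.1, s.2.1, s.2.2.1, s.2.2.2 - 1)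
  else if step = "B2" then some (s.1, s.2.1, s.2.2.1, s.2.2.2 + 2)
  else if step = "D" ∨ step = "D'" ∨ step = "D2" ∨ step = "U" ∨ step = "U'" ∨ step = "U2" then some s
  else none

def LFRB_preserved (steps : List String) : Bool :=
  match steps.foldl (fun acc st => acc.bind (fun s => pvAStep s st)) (some (0, 0, 0, 0)) with
  | none => false   -- the raise; unreachable inside Pre_
  | some (l, f, r, b) =>
    if l = 0 ∧ f = 0 ∧ r = 0 ∧ b = 0 then true
    else if PySem.Int.mod l 4 = 0 ∧ PySem.Int.mod f 4 = 0 ∧ PySem.Int.mod r 4 = 0 ∧ PySem.Int.mod b 4 = 0 then true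
    else false

-- ===== PORT B =====
-- rot = {"": 1, "'": 3, "2": 2}
def pvRot : PySem.Dict String Int := PySem.Dict.ofList [("", 1), ("'", 3), ("2", 2)]
-- ident = [0, 1, 2, 3]
def pvIdent : List Int := [0, 1, 2, 3]
-- centers = {f: ident for f in "LFRB"}
def pvInit : PySem.Dict String (List Int) :=
  PySem.Dict.ofList [("L", pvIdent), ("F", pvIdent), ("R", pvIdent), ("B", pvIdent)]

-- one loop iteration of B: none = the raise branch; step[:1]/step[1:] via PySem.Str.slice (exact)
def pvBStep (centers : PySem.Dict String (List Int)) (step : String) :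
    Option (PySem.Dict String (List Int)) :=
  let face := PySem.Str.slice step none (some 1)
  let sfx := PySem.Str.slice step (some 1) none
  if ¬(face = "L" ∨ face = "F" ∨ face = "R" ∨ face = "B" ∨ face = "D" ∨ face = "U") ∨
      ¬ pvRot.contains sfx then none
  else if centers.contains face then
    let k := pvRot.getD sfx 0
    let c := centers.getD face []
    -- centers[face] = c[-k:] + c[:-k]
    some (centers.insert face (PySem.List.slice c (some (-k)) none ++ PySem.List.slice c none (some (-k))))
  else some centers

def LFRB_preserved_alt (steps : List String) : Bool :=
  match steps.foldl (fun acc st => acc.bind (fun c => pvBStep c st)) (some pvInit) with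
  | none => false   -- the raise; unreachable inside Pre_
  | some centers => centers.values.all (fun c => c == pvIdent)

-- ===== PRECONDITION & SPEC =====
def pvAllowed : List String :=
  ["L", "L'", "L2", "F", "F'", "F2", "R", "R'", "R2", "B", "B'", "B2", "D", "D'", "D2", "U", "U'", "U2"]

-- Pre_ excludes exactly the inputs with a token outside the 18 legal moves, on which A raises Exception
def Pre_LFRB_preserved (steps : List String) : Prop :=
  ∀ s ∈ steps, s ∈ pvAllowed
instance (steps : List String) : Decidable (Pre_LFRB_preserved steps) := by unfold Pre_LFRB_preserved; infer_instance

def pvWitness_LFRB_preserved : List String := ["L", "F'", "U2", "L", "L2", "D"]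

def Spec_LFRB_preserved (steps : List String) (out : Bool) : Prop := out = LFRB_preserved_alt steps
instance (steps : List String) (out : Bool) : Decidable (Spec_LFRB_preserved steps out) := by unfold Spec_LFRB_preserved; infer_instance

-- ===== CLAIM (what is proved, stated in full; the proofs are below) =====
def Claim_equal_LFRB_preserved : Prop := ∀ (steps : List String), Dom_LFRB_preserved steps → Pre_LFRB_preserved steps → Spec_LFRB_preserved steps (LFRB_preserved steps)

-- ===== LEMMAS AND PROOFS =====

-- per-token contribution to each of A's face counters (proof-only helpers)
def pvDL (x : String) : Int := if x = "L" then 1 else if x = "L'" then -1 else if x = "L2" then 2 else 0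
def pvDF (x : String) : Int := if x = "F" then 1 else if x = "F'" then -1 else if x = "F2" then 2 else 0
def pvDR (x : String) : Int := if x = "R" then 1 else if x = "R'" then -1 else if x = "R2" then 2 else 0
def pvDB (x : String) : Int := if x = "B" then 1 else if x = "B'" then -1 else if x = "B2" then 2 else 0

-- the same contributions in ZMod 4 (B's sticker cycles live in the 4-rotation group)
def pvZL (x : String) : ZMod 4 := if x = "L" then 1 else if x = "L'" then 3 else if x = "L2" then 2 else 0
def pvZF (x : String) : ZMod 4 := if x = "F" then 1 else if x = "F'" then 3 else if x = "F2" then 2 else 0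
def pvZR (x : String) : ZMod 4 := if x = "R" then 1 else if x = "R'" then 3 else if x = "R2" then 2 else 0
def pvZB (x : String) : ZMod 4 := if x = "B" then 1 else if x = "B'" then 3 else if x = "B2" then 2 else 0

theorem pvZL_cast (x : String) : pvZL x = ((pvDL x : Int) : ZMod 4) := by
  unfold pvZL pvDL; split_ifs <;> decide
theorem pvZF_cast (x : String) : pvZF x = ((pvDF x : Int) : ZMod 4) := by
  unfold pvZF pvDF; split_ifs <;> decide
theorem pvZR_cast (x : String) : pvZR x = ((pvDR x : Int) : ZMod 4) := by
  unfold pvZR pvDR; split_ifs <;> decide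
theorem pvZB_cast (x : String) : pvZB x = ((pvDB x : Int) : ZMod 4) := by
  unfold pvZB pvDB; split_ifs <;> decide

theorem pvAStep_allowed (s : Int × Int × Int × Int) (x : String) (hx : x ∈ pvAllowed) :
    pvAStep s x = some (s.1 + pvDL x, s.2.1 + pvDF x, s.2.2.1 + pvDR x, s.2.2.2 + pvDB x) := by
  simp only [pvAllowed, List.mem_cons, List.not_mem_nil, or_false] at hx
  rcases hx with h | h | h | h | h | h | h | h | h | h | h | h | h | h | h | h | h | h <;>
    subst h <;> simp [pvAStep, pvDL, pvDF, pvDR, pvDB] <;> omega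

-- A's fold from an arbitrary state, on valid steps, adds the per-face contributions
theorem pvAFold (steps : List String) (l f r b : Int)
    (h : ∀ s ∈ steps, s ∈ pvAllowed) :
    steps.foldl (fun acc st => acc.bind (fun s => pvAStep s st)) (some (l, f, r, b)) =
      some (l + (steps.map pvDL).sum, f + (steps.map pvDF).sum,
            r + (steps.map pvDR).sum, b + (steps.map pvDB).sum) := by
  induction steps generalizing l f r b with
  | nil => simp
  | cons x xs ih =>
    have hx : x ∈ pvAllowed := h x (by simp)
    have hxs : ∀ s ∈ xs, s ∈ pvAllowed := fun s hs => h s (List.mem_cons_of_mem _ hs)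
    simp only [List.foldl_cons, Option.bind_some]
    rw [pvAStep_allowed _ _ hx, ih _ _ _ _ hxs]
    simp only [List.map_cons, List.sum_cons, Option.some.injEq, Prod.mk.injEq]
    refine ⟨by ring, by ring, by ring, by ring⟩

-- the four rotations of the identity sticker cycle
def pvR : ZMod 4 → List Int
  | 0 => [0, 1, 2, 3]
  | 1 => [3, 0, 1, 2]
  | 2 => [2, 3, 0, 1]
  | _ => [1, 2, 3, 0]

def pvDState (a b c d : ZMod 4) : PySem.Dict String (List Int) :=
  PySem.Dict.mk [("L", pvR a), ("F", pvR b), ("R", pvR c), ("B", pvR d)]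

-- slicing c[-k:] + c[:-k] advances a rotation by k
theorem pvRot1 (j : ZMod 4) :
    PySem.List.slice (pvR j) (some (-1)) none ++ PySem.List.slice (pvR j) none (some (-1)) =
      pvR (j + 1) := by fin_cases j <;> decide
theorem pvRot2 (j : ZMod 4) :
    PySem.List.slice (pvR j) (some (-2)) none ++ PySem.List.slice (pvR j) none (some (-2)) =
      pvR (j + 2) := by fin_cases j <;> decide
theorem pvRot3 (j : ZMod 4) :
    PySem.List.slice (pvR j) (some (-3)) none ++ PySem.List.slice (pvR j) none (some (-3)) =
      pvR (j + 3) := by fin_cases j <;> decide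

-- B's loop body on a valid token, on the abstract rotation state
theorem pvBStep_allowed (x : String) (hx : x ∈ pvAllowed) (a b c d : ZMod 4) :
    pvBStep (pvDState a b c d) x =
      some (pvDState (a + pvZL x) (b + pvZF x) (c + pvZR x) (d + pvZB x)) := by
  simp only [pvAllowed, List.mem_cons, List.not_mem_nil, or_false] at hx
  rcases hx with h | h | h | h | h | h | h | h | h | h | h | h | h | h | h | h | h | h <;> subst h
  · show some (PySem.Dict.mk [("L", PySem.List.slice (pvR a) (some (-1)) none ++ PySem.List.slice (pvR a) none (some (-1))), ("F", pvR b), ("R", pvR c), ("B", pvR d)]) = _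
    rw [pvRot1]; simp [pvZL, pvZF, pvZR, pvZB, pvDState]
  · show some (PySem.Dict.mk [("L", PySem.List.slice (pvR a) (some (-3)) none ++ PySem.List.slice (pvR a) none (some (-3))), ("F", pvR b), ("R", pvR c), ("B", pvR d)]) = _
    rw [pvRot3]; simp [pvZL, pvZF, pvZR, pvZB, pvDState]
  · show some (PySem.Dict.mk [("L", PySem.List.slice (pvR a) (some (-2)) none ++ PySem.List.slice (pvR a) none (some (-2))), ("F", pvR b), ("R", pvR c), ("B", pvR d)]) = _
    rw [pvRot2]; simp [pvZL, pvZF, pvZR, pvZB, pvDState]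
  · show some (PySem.Dict.mk [("L", pvR a), ("F", PySem.List.slice (pvR b) (some (-1)) none ++ PySem.List.slice (pvR b) none (some (-1))), ("R", pvR c), ("B", pvR d)]) = _
    rw [pvRot1]; simp [pvZL, pvZF, pvZR, pvZB, pvDState]
  · show some (PySem.Dict.mk [("L", pvR a), ("F", PySem.List.slice (pvR b) (some (-3)) none ++ PySem.List.slice (pvR b) none (some (-3))), ("R", pvR c), ("B", pvR d)]) = _
    rw [pvRot3]; simp [pvZL, pvZF, pvZR, pvZB, pvDState]
  · show some (PySem.Dict.mk [("L", pvR a), ("F", PySem.List.slice (pvR b) (some (-2)) none ++ PySem.List.slice (pvR b) none (some (-2))), ("R", pvR c), ("B", pvR d)]) = _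
    rw [pvRot2]; simp [pvZL, pvZF, pvZR, pvZB, pvDState]
  · show some (PySem.Dict.mk [("L", pvR a), ("F", pvR b), ("R", PySem.List.slice (pvR c) (some (-1)) none ++ PySem.List.slice (pvR c) none (some (-1))), ("B", pvR d)]) = _
    rw [pvRot1]; simp [pvZL, pvZF, pvZR, pvZB, pvDState]
  · show some (PySem.Dict.mk [("L", pvR a), ("F", pvR b), ("R", PySem.List.slice (pvR c) (some (-3)) none ++ PySem.List.slice (pvR c) none (some (-3))), ("B", pvR d)]) = _
    rw [pvRot3]; simp [pvZL, pvZF, pvZR, pvZB, pvDState]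
  · show some (PySem.Dict.mk [("L", pvR a), ("F", pvR b), ("R", PySem.List.slice (pvR c) (some (-2)) none ++ PySem.List.slice (pvR c) none (some (-2))), ("B", pvR d)]) = _
    rw [pvRot2]; simp [pvZL, pvZF, pvZR, pvZB, pvDState]
  · show some (PySem.Dict.mk [("L", pvR a), ("F", pvR b), ("R", pvR c), ("B", PySem.List.slice (pvR d) (some (-1)) none ++ PySem.List.slice (pvR d) none (some (-1)))]) = _
    rw [pvRot1]; simp [pvZL, pvZF, pvZR, pvZB, pvDState]
  · show some (PySem.Dict.mk [("L", pvR a), ("F", pvR b), ("R", pvR c), ("B", PySem.List.slice (pvR d) (some (-3)) none ++ PySem.List.slice (pvR d) none (some (-3)))]) = _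
    rw [pvRot3]; simp [pvZL, pvZF, pvZR, pvZB, pvDState]
  · show some (PySem.Dict.mk [("L", pvR a), ("F", pvR b), ("R", pvR c), ("B", PySem.List.slice (pvR d) (some (-2)) none ++ PySem.List.slice (pvR d) none (some (-2)))]) = _
    rw [pvRot2]; simp [pvZL, pvZF, pvZR, pvZB, pvDState]
  all_goals (show some (pvDState a b c d) = _ ; simp [pvZL, pvZF, pvZR, pvZB])

-- B's fold from an arbitrary rotation state adds the per-face contributions in ZMod 4
theorem pvBFold (steps : List String) (a b c d : ZMod 4)
    (h : ∀ s ∈ steps, s ∈ pvAllowed) :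
    steps.foldl (fun acc st => acc.bind (fun cs => pvBStep cs st)) (some (pvDState a b c d)) =
      some (pvDState (a + (steps.map pvZL).sum) (b + (steps.map pvZF).sum)
            (c + (steps.map pvZR).sum) (d + (steps.map pvZB).sum)) := by
  induction steps generalizing a b c d with
  | nil => simp
  | cons x xs ih =>
    have hx : x ∈ pvAllowed := h x (by simp)
    have hxs : ∀ s ∈ xs, s ∈ pvAllowed := fun s hs => h s (List.mem_cons_of_mem _ hs)
    simp only [List.foldl_cons, Option.bind_some]
    rw [pvBStep_allowed x hx, ih _ _ _ _ hxs]
    simp only [List.map_cons, List.sum_cons, Option.some.injEq]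
    congr 1 <;> ring

theorem pvR_eq_ident (j : ZMod 4) : (pvR j == pvIdent) = (j == 0) := by
  fin_cases j <;> decide

theorem pvZsum_cast (steps : List String) (z : String → ZMod 4) (dI : String → Int)
    (hz : ∀ x, z x = ((dI x : Int) : ZMod 4)) :
    (steps.map z).sum = (((steps.map dI).sum : Int) : ZMod 4) := by
  induction steps with
  | nil => simp
  | cons x xs ih => simp [hz x, ih]

-- ===== VERDICT (by name: the statement is the Claim_ definition above) =====
theorem LFRB_preserved_spec : Claim_equal_LFRB_preserved := by
  unfold Claim_equal_LFRB_preserved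
  intro steps _ hpre
  unfold Spec_LFRB_preserved LFRB_preserved LFRB_preserved_alt
  rw [pvAFold steps 0 0 0 0 hpre,
      show pvInit = pvDState 0 0 0 0 from rfl, pvBFold steps 0 0 0 0 hpre]
  simp only [zero_add]
  rw [show (pvDState ((steps.map pvZL).sum) ((steps.map pvZF).sum) ((steps.map pvZR).sum)
        ((steps.map pvZB).sum)).values.all (fun c => c == pvIdent)
      = ((pvR ((steps.map pvZL).sum) == pvIdent) && (pvR ((steps.map pvZF).sum) == pvIdent) &&
         (pvR ((steps.map pvZR).sum) == pvIdent) && (pvR ((steps.map pvZB).sum) == pvIdent)) from by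
        simp [pvDState, PySem.Dict.values, Bool.and_assoc]]
  rw [pvR_eq_ident, pvR_eq_ident, pvR_eq_ident, pvR_eq_ident,
      pvZsum_cast steps pvZL pvDL pvZL_cast, pvZsum_cast steps pvZF pvDF pvZF_cast,
      pvZsum_cast steps pvZR pvDR pvZR_cast, pvZsum_cast steps pvZB pvDB pvZB_cast]
  have hiff : ∀ n : Int, ((n : ZMod 4) == 0) = (PySem.Int.mod n 4 == 0) := by
    intro n
    by_cases h : (4:Int) ∣ n
    · have h1 : ((n : ZMod 4)) = 0 := (ZMod.intCast_zmod_eq_zero_iff_dvd n 4).mpr (by exact_mod_cast h)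
      simp [h1]
      exact h
    · have h1 : ¬((n : ZMod 4)) = 0 := fun hc => h (by exact_mod_cast (ZMod.intCast_zmod_eq_zero_iff_dvd n 4).mp hc)
      simp [h1]
      exact h
  rw [hiff, hiff, hiff, hiff]
  by_cases hm : PySem.Int.mod ((steps.map pvDL).sum) 4 = 0 ∧ PySem.Int.mod ((steps.map pvDF).sum) 4 = 0 ∧
      PySem.Int.mod ((steps.map pvDR).sum) 4 = 0 ∧ PySem.Int.mod ((steps.map pvDB).sum) 4 = 0
  · obtain ⟨h1, h2, h3, h4⟩ := hm
    have d1 := (PySem.Int.mod_eq_zero_iff_dvd _ 4).mp h1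
    have d2 := (PySem.Int.mod_eq_zero_iff_dvd _ 4).mp h2
    have d3 := (PySem.Int.mod_eq_zero_iff_dvd _ 4).mp h3
    have d4 := (PySem.Int.mod_eq_zero_iff_dvd _ 4).mp h4
    split_ifs with hz hmd
    · simp
      exact ⟨⟨⟨d1, d2⟩, d3⟩, d4⟩
    · simp
      exact ⟨⟨⟨d1, d2⟩, d3⟩, d4⟩
    · exact absurd ⟨h1, h2, h3, h4⟩ hmd
  · have h0 : ¬((steps.map pvDL).sum = 0 ∧ (steps.map pvDF).sum = 0 ∧ (steps.map pvDR).sum = 0 ∧ (steps.map pvDB).sum = 0) := by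
      rintro ⟨e1, e2, e3, e4⟩
      exact hm ⟨by simp [e1, PySem.Int.mod], by simp [e2, PySem.Int.mod],
        by simp [e3, PySem.Int.mod], by simp [e4, PySem.Int.mod]⟩
    rw [if_neg h0, if_neg hm]
    symm
    rw [Bool.eq_false_iff]
    intro hc
    simp only [Bool.and_eq_true, beq_iff_eq] at hc
    exact hm ⟨hc.1.1.1, hc.1.1.2, hc.1.2, hc.2⟩
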